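-- pv_equiv track=rewrite | github.com/tgotg7996/pentaage | backend/app/core/fingerprint.py | _legacy_fingerprint
-- ===== SOURCE A (Python) =====
-- def _legacy_fingerprint(smiles: str, radius: int, n_bits: int) -> list[int]:
--     window = max(radius + 1, 1)
--     bits: set[int] = set()
--
--     if len(smiles) < window:
--         bits.add(sum(ord(char) for char in smiles) % n_bits)
--     else:
--         for index in range(len(smiles) - window + 1):
--             segment = smiles[index : index + window]
--             bits.add(sum(ord(char) * (position + 1) for position, char in enumerate(segment)) % n_bits)
--
--     return sorted(bits)
-- ===== SOURCE B (Python) =====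
-- def _legacy_fingerprint(smiles: str, radius: int, n_bits: int) -> list[int]:
--     window = max(radius + 1, 1)
--     codes = [ord(c) for c in smiles]
--     if len(codes) < window:
--         return [sum(codes) % n_bits]
--     # rolling sums: s = plain sum of current window, wsum = position-weighted sum
--     s = sum(codes[:window])
--     wsum = sum((i + 1) * c for i, c in enumerate(codes[:window]))
--     seen = {wsum % n_bits}
--     for old, new in zip(codes, codes[window:]):
--         wsum = wsum - s + new * window
--         s = s - old + new
--         seen.add(wsum % n_bits)
--     return sorted(seen)
-- ===== Notes on version B (the rewrite author's own statement) =====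
-- stated objective: faster
-- what changed: B replaces A's per-window recomputation of the weighted character sum (slice + enumerate inside the loop) by an incremental rolling update of two running sums (window sum and weighted sum), each window hash obtained in O(1).
import Mathlib
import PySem

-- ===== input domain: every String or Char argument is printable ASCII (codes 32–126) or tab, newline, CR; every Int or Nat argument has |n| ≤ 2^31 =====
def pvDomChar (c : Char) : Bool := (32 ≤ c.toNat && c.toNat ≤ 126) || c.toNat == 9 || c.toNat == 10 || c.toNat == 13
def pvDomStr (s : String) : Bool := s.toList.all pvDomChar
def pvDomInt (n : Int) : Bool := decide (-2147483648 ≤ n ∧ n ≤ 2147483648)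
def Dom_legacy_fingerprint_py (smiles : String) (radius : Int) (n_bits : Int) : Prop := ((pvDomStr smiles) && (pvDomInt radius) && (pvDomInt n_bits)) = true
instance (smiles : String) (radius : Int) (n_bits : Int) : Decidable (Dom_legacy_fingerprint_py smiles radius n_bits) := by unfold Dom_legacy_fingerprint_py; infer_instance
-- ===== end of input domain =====

-- B replaces A's per-window O(window) weighted re-summation by an O(1) rolling update of two
-- running sums (plain sum and weighted sum), making the scan O(n) instead of O(n·window).

-- ===== PORT A =====
-- string slicing / iteration is ported through toList (exact: Python string slicing = list-of-chars slicing)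
def legacy_fingerprint_py (smiles : String) (radius : Int) (n_bits : Int) : List Int :=
  let window : Int := max (radius + 1) 1
  let cs := smiles.toList
  let bits : PySem.Set Int :=
    if (cs.length : Int) < window then
      PySem.Set.add PySem.Set.empty
        (PySem.Int.mod ((cs.map (fun c => (c.toNat : Int))).sum) n_bits)
    else
      (PySem.List.pyRange 0 ((cs.length : Int) - window + 1) 1).foldl
        (fun bits index =>
          let segment := PySem.List.slice cs (some index) (some (index + window))
          PySem.Set.add bits
            (PySem.Int.mod
              (((PySem.List.enumerate segment).map
                (fun pc => (pc.2.toNat : Int) * (pc.1 + 1))).sum) n_bits))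
        PySem.Set.empty
  PySem.List.sorted bits (fun x => x) false

-- ===== PORT B =====
-- codes[:window] / codes[window:] are `take`/`drop` (window ≥ 1, so nonnegative slice bounds)
def legacy_fingerprint_py_alt (smiles : String) (radius : Int) (n_bits : Int) : List Int :=
  let window : Int := max (radius + 1) 1
  let codes := smiles.toList.map (fun c => (c.toNat : Int))
  if (codes.length : Int) < window then
    [PySem.Int.mod codes.sum n_bits]
  else
    let s0 := (codes.take window.toNat).sum
    let w0 := ((PySem.List.enumerate (codes.take window.toNat)).map
      (fun pc => (pc.1 + 1) * pc.2)).sum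
    let st := (codes.zip (codes.drop window.toNat)).foldl
      (fun (st : Int × Int × PySem.Set Int) on =>
        let wsum := st.1 - st.2.1 + on.2 * window
        let s := st.2.1 - on.1 + on.2
        (wsum, s, PySem.Set.add st.2.2 (PySem.Int.mod wsum n_bits)))
      (w0, s0, PySem.Set.add PySem.Set.empty (PySem.Int.mod w0 n_bits))
    PySem.List.sorted st.2.2 (fun x => x) false

-- ===== PRECONDITION & SPEC =====
-- Pre_ excludes exactly n_bits = 0, on which Python A raises ZeroDivisionError ('% n_bits')
def Pre_legacy_fingerprint_py (smiles : String) (radius : Int) (n_bits : Int) : Prop := n_bits ≠ 0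
instance (smiles : String) (radius : Int) (n_bits : Int) : Decidable (Pre_legacy_fingerprint_py smiles radius n_bits) := by unfold Pre_legacy_fingerprint_py; infer_instance
def pvWitness_legacy_fingerprint_py : String × Int × Int := ("CCO", 2, 8)

def Spec_legacy_fingerprint_py (smiles : String) (radius : Int) (n_bits : Int) (out : List Int) : Prop := out = legacy_fingerprint_py_alt smiles radius n_bits
instance (smiles : String) (radius : Int) (n_bits : Int) (out : List Int) : Decidable (Spec_legacy_fingerprint_py smiles radius n_bits out) := by unfold Spec_legacy_fingerprint_py; infer_instance

-- ===== CLAIM (what is proved, stated in full; the proofs are below) =====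
def Claim_equal_legacy_fingerprint_py : Prop := ∀ (smiles : String) (radius : Int) (n_bits : Int), Dom_legacy_fingerprint_py smiles radius n_bits → Pre_legacy_fingerprint_py smiles radius n_bits → Spec_legacy_fingerprint_py smiles radius n_bits (legacy_fingerprint_py smiles radius n_bits)

-- ===== LEMMAS AND PROOFS =====

-- position-weighted sum: wW [c0, c1, …] = 1*c0 + 2*c1 + …
def wW : List Int → Int
  | [] => 0
  | x :: l => x + (l.sum + wW l)

-- the window starting at position k, and its hashed value
def winH (codes : List Int) (w k : Nat) : List Int := (codes.drop k).take w
def valH (codes : List Int) (w : Nat) (n_bits : Int) (k : Nat) : Int :=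
  PySem.Int.mod (wW (winH codes w k)) n_bits

theorem enum_wsum {α : Type} (g : α → Int) (l : List α) : ∀ (s : Int),
    ((PySem.List.enumerate l s).map (fun pc => g pc.2 * (pc.1 + 1))).sum
      = wW (l.map g) + s * (l.map g).sum := by
  induction l with
  | nil => intro s; simp [PySem.List.enumerate_nil, wW]
  | cons x t ih =>
    intro s
    simp only [PySem.List.enumerate_cons, List.map_cons, List.sum_cons, wW, ih (s + 1)]
    ring

theorem wW_append_singleton (l : List Int) (y : Int) :
    wW (l ++ [y]) = wW l + ((l.length : Int) + 1) * y := by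
  induction l with
  | nil => simp [wW]
  | cons x t ih =>
    simp only [List.cons_append, wW, ih, List.sum_append, List.length_cons, List.sum_cons,
      List.sum_nil]
    push_cast
    ring

theorem winH_len (codes : List Int) (w k : Nat) (h : k + w ≤ codes.length) :
    (winH codes w k).length = w := by
  simp [winH]; omega

theorem win_step (codes : List Int) (w m : Nat) (h : m + w < codes.length) :
    wW (winH codes w m) + ((w : Int) + 1) * codes[m + w]
        = codes[m]'(by omega) + ((winH codes w (m + 1)).sum + wW (winH codes w (m + 1)))
    ∧ (winH codes w m).sum + codes[m + w]
        = codes[m]'(by omega) + (winH codes w (m + 1)).sum := by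
  have h1 : (codes.drop m).take (w + 1) = winH codes w m ++ [codes[m + w]] := by
    rw [winH, List.take_add_one]
    congr 1
    rw [List.getElem?_drop, List.getElem?_eq_getElem h]
    rfl
  have h2 : (codes.drop m).take (w + 1) = codes[m]'(by omega) :: winH codes w (m + 1) := by
    rw [List.drop_eq_getElem_cons (by omega : m < codes.length), List.take_succ_cons, winH]
  constructor
  · have := (congrArg wW (h1.symm.trans h2))
    rw [wW_append_singleton, winH_len codes w m (by omega)] at this
    simpa [wW] using this
  · have := (congrArg List.sum (h1.symm.trans h2))
    simpa using this


theorem Bfold (codes : List Int) (w : Nat) (n_bits window : Int) (hwi : (w : Int) = window)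
    (seen0 : PySem.Set Int) (m : Nat) (hm : m + w ≤ codes.length) :
    ((codes.zip (codes.drop w)).take m).foldl
      (fun (st : Int × Int × PySem.Set Int) on =>
        (st.1 - st.2.1 + on.2 * window, st.2.1 - on.1 + on.2,
         PySem.Set.add st.2.2 (PySem.Int.mod (st.1 - st.2.1 + on.2 * window) n_bits)))
      (wW (winH codes w 0), (winH codes w 0).sum, seen0)
      = (wW (winH codes w m), (winH codes w m).sum,
         (List.range m).foldl
           (fun acc j => PySem.Set.add acc (valH codes w n_bits (j + 1))) seen0) := by
  induction m with
  | zero => simp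
  | succ m ih =>
    have hzl : m < (codes.zip (codes.drop w)).length := by
      rw [List.length_zip, List.length_drop]; omega
    have hmw : m + w < codes.length := by omega
    obtain ⟨E1, E2⟩ := win_step codes w m hmw
    have hidx : (codes.drop w)[m]'(by rw [List.length_drop]; omega) = codes[m + w] := by
      rw [List.getElem_drop]
      exact getElem_congr rfl (by omega) (by omega)
    have htake : (codes.zip (codes.drop w)).take (m + 1)
        = (codes.zip (codes.drop w)).take m ++ [(codes[m]'(by omega), codes[m + w])] := by
      rw [List.take_add_one, List.getElem?_eq_getElem hzl]
      rw [List.getElem_zip, hidx]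
      rfl
    rw [htake, List.foldl_append, ih (by omega)]
    simp only [List.foldl_cons, List.foldl_nil]
    have hW : wW (winH codes w m) - (winH codes w m).sum + codes[m + w] * window
        = wW (winH codes w (m + 1)) := by rw [← hwi]; linear_combination E1 - E2
    have hS : (winH codes w m).sum - codes[m]'(by omega) + codes[m + w]
        = (winH codes w (m + 1)).sum := by linear_combination E2
    rw [List.range_succ, List.foldl_append]
    simp only [List.foldl_cons, List.foldl_nil]
    rw [hW, hS, valH]

theorem legacy_fingerprint_py_spec : Claim_equal_legacy_fingerprint_py := by
  intro smiles radius n_bits _ _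
  unfold Spec_legacy_fingerprint_py
  simp only [legacy_fingerprint_py, legacy_fingerprint_py_alt, List.length_map]
  by_cases hlt : (smiles.toList.length : Int) < max (radius + 1) 1
  · simp only [if_pos hlt]
    simp [PySem.Set.add, PySem.Set.empty, PySem.List.sorted, PySem.List.insertBy]
  · simp only [if_neg hlt]
    set window : Int := max (radius + 1) 1 with hwin
    set cs := smiles.toList with hcs
    set codes : List Int := cs.map (fun c => (c.toNat : Int)) with hcodes
    set w : Nat := window.toNat with hw
    have hw1 : 1 ≤ window := le_max_right _ _
    have hwi : (w : Int) = window := Int.toNat_of_nonneg (by omega)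
    have hn : w ≤ cs.length := by omega
    have hnn : (cs.length : Int) - window + 1 = ((cs.length - w + 1 : Nat) : Int) := by
      push_cast; omega
    rw [hnn, PySem.List.pyRange_zero_natCast, List.foldl_map]
    have hbody : (fun (bits : PySem.Set Int) (j : Nat) =>
        PySem.Set.add bits (PySem.Int.mod
          (((PySem.List.enumerate
              (PySem.List.slice cs (some (j : Int)) (some ((j : Int) + window)))).map
            (fun pc => (pc.2.toNat : Int) * (pc.1 + 1))).sum) n_bits))
        = (fun acc j => PySem.Set.add acc (valH codes w n_bits j)) := by
      funext acc j
      have h1 : ((j : Int) + window) = ((j + w : Nat) : Int) := by push_cast; omega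
      rw [h1, PySem.List.slice_natCast]
      have h2 : j + w - j = w := by omega
      rw [h2, enum_wsum (g := fun c : Char => ((c.toNat : Int)))]
      simp [valH, winH, hcodes, List.map_take, List.map_drop]
    rw [hbody]
    have hwin0 : codes.take w = winH codes w 0 := by simp [winH]
    have hw0 : ((PySem.List.enumerate (codes.take w)).map
        (fun pc => (pc.1 + 1) * pc.2)).sum = wW (winH codes w 0) := by
      have hmc : (fun pc : Int × Int => (pc.1 + 1) * pc.2)
          = (fun pc : Int × Int => id pc.2 * (pc.1 + 1)) := by
        funext pc; simp [mul_comm]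
      rw [hmc, enum_wsum (g := id)]
      simp [hwin0]
    rw [hw0, hwin0]
    have hzfull : (codes.zip (codes.drop w)) = (codes.zip (codes.drop w)).take (cs.length - w) := by
      rw [List.take_of_length_le]
      rw [List.length_zip, List.length_drop]
      simp [hcodes]
    rw [hzfull, Bfold codes w n_bits window hwi _ (cs.length - w) (by simp [hcodes]; omega)]
    have hrange : ∀ (k : Nat) (e : PySem.Set Int) (f : Nat → Int),
        (List.range (k + 1)).foldl (fun acc j => PySem.Set.add acc (f j)) e
        = (List.range k).foldl (fun acc j => PySem.Set.add acc (f (j + 1)))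
            (PySem.Set.add e (f 0)) := by
      intro k e f
      rw [List.range_succ_eq_map, List.foldl_cons, List.foldl_map]
    rw [hrange]
    rfl
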